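-- pv_equiv track=rewrite | github.com/simom1/MT5_Extremum_Analyzer | src/backtest_engine.py | _get_max_consecutive
-- ===== SOURCE A (Python) =====
-- def _get_max_consecutive(series):
--     max_consecutive = 0
--     current_consecutive = 0
--     for val in series:
--         if val:
--             current_consecutive += 1
--             max_consecutive = max(max_consecutive, current_consecutive)
--         else:
--             current_consecutive = 0
--     return max_consecutive
-- ===== SOURCE B (Python) =====
-- def _get_max_consecutive(series):
--     # Group-then-reduce: collect the length of every maximal truthy run,
--     # then take the maximum of those lengths (0 if there are none).
--     lengths = []
--     run = 0
--     for val in series: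
--         if val:
--             run += 1
--         else:
--             if run:
--                 lengths.append(run)
--             run = 0
--     if run:
--         lengths.append(run)
--     best = 0
--     for n in lengths:
--         best = max(best, n)
--     return best
-- ===== Notes on version B (the rewrite author's own statement) =====
-- stated objective: alternative
-- what changed: B splits the series into maximal truthy runs, collecting each completed run length into a list, and only afterwards reduces that list with max (group-then-reduce), instead of A's single pass that interleaves a running maximum with the run counter.
import Mathlib
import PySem

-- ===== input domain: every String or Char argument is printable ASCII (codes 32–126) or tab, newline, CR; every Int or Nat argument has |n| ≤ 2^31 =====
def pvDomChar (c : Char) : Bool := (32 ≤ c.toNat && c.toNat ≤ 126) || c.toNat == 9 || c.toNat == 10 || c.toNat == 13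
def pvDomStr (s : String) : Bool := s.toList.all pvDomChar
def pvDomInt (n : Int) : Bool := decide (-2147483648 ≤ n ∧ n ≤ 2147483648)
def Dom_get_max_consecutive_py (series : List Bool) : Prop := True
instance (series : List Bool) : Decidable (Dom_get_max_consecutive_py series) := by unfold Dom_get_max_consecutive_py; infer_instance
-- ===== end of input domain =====

-- B collects the lengths of all maximal truthy runs into a list and then reduces
-- that list with max (group-then-reduce), instead of A's interleaved running maximum.


-- ===== PORT A =====
-- step of A's loop: state = (max_consecutive, current_consecutive)
def pvStepA (st : Int × Int) (val : Bool) : Int × Int :=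
  if val then (max st.1 (st.2 + 1), st.2 + 1) else (st.1, 0)

def get_max_consecutive_py (series : List Bool) : Int :=
  (series.foldl pvStepA (0, 0)).1

-- ===== PORT B =====
-- step of B's first loop: state = (lengths, run)
def pvStepB (st : List Int × Int) (val : Bool) : List Int × Int :=
  if val then (st.1, st.2 + 1)
  else (if st.2 ≠ 0 then st.1 ++ [st.2] else st.1, 0)

def get_max_consecutive_py_alt (series : List Bool) : Int :=
  let p := series.foldl pvStepB ([], 0)
  let lengths := if p.2 ≠ 0 then p.1 ++ [p.2] else p.1
  lengths.foldl max 0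

-- ===== PRECONDITION & SPEC =====
def Spec_get_max_consecutive_py (series : List Bool) (out : Int) : Prop := out = get_max_consecutive_py_alt series
instance (series : List Bool) (out : Int) : Decidable (Spec_get_max_consecutive_py series out) := by unfold Spec_get_max_consecutive_py; infer_instance

-- ===== CLAIM (what is proved, stated in full; the proofs are below) =====
def Claim_equal_get_max_consecutive_py : Prop := ∀ (series : List Bool), Dom_get_max_consecutive_py series → Spec_get_max_consecutive_py series (get_max_consecutive_py series)

-- ===== LEMMAS AND PROOFS =====

theorem foldl_max_nonneg (l : List Int) (a : Int) (h : 0 ≤ a) : 0 ≤ l.foldl max a := by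
  induction l generalizing a with
  | nil => exact h
  | cons x xs ih => exact ih _ (le_trans h (le_max_left a x))

-- Invariant linking A's state (m, c) to B's state (lens, run):
-- c = run and m = max (current maximum of lens) run.
theorem pv_key (xs : List Bool) : ∀ (m c : Int) (lens : List Int) (run : Int),
    c = run → 0 ≤ run → m = max (lens.foldl max 0) run →
    (xs.foldl pvStepA (m, c)).1 =
      (let p := xs.foldl pvStepB (lens, run);
        max (p.1.foldl max 0) p.2) := by
  induction xs with
  | nil =>
    intro m c lens run hc hr hm
    simpa using hm
  | cons x xs ih =>
    intro m c lens run hc hr hm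
    cases x with
    | true =>
      simp only [List.foldl_cons, pvStepA, pvStepB]
      refine ih (max m (c + 1)) (c + 1) lens (run + 1) (by omega) (by omega) ?_
      subst hc; omega
    | false =>
      simp only [List.foldl_cons, pvStepA, pvStepB]
      simp only [if_neg (by simp : ¬ (false = true))]
      refine ih m 0 (if run ≠ 0 then lens ++ [run] else lens) 0 rfl le_rfl ?_
      have hnn : 0 ≤ lens.foldl max 0 := foldl_max_nonneg lens 0 le_rfl
      by_cases h0 : run = 0
      · simp [h0] at hm ⊢; omega
      · simp [h0, List.foldl_append] at hm ⊢; omega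

theorem pv_run_nonneg (xs : List Bool) : ∀ (st : List Int × Int), 0 ≤ st.2 →
    0 ≤ (xs.foldl pvStepB st).2 := by
  induction xs with
  | nil => intro st h; exact h
  | cons x xs ih =>
    intro st h
    simp only [List.foldl_cons]
    apply ih
    cases x
    · simp [pvStepB]
    · simp [pvStepB]; omega

-- ===== VERDICT (by name: the statement is the Claim_ definition above) =====
theorem get_max_consecutive_py_spec : Claim_equal_get_max_consecutive_py := by
  intro series _
  unfold Spec_get_max_consecutive_py get_max_consecutive_py get_max_consecutive_py_alt
  have h := pv_key series 0 0 [] 0 rfl le_rfl (by simp)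
  rw [h]
  have hnn : 0 ≤ (series.foldl pvStepB ([], 0)).1.foldl max 0 := foldl_max_nonneg _ 0 le_rfl
  have hr : 0 ≤ (series.foldl pvStepB ([], 0)).2 := pv_run_nonneg series ([], 0) le_rfl
  by_cases h0 : (series.foldl pvStepB ([], 0)).2 = 0
  · simp [h0]; omega
  · simp [h0, List.foldl_append]
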